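-- pv_equiv track=rewrite | github.com/dg4bc/python_test | modelling/sequence_combination.py | generate_trade_sequence
-- ===== SOURCE A (Python) =====
-- import typing
--
-- def generate_trade_sequence(
--     entries: typing.List[int], exits: typing.List[int]
-- ) -> typing.List[typing.Tuple[int, int]]:
--     """
--     Takes entry and exit signals and converts them to a sequence of matched pairs
--     :param entries: Sorted references where a trade should be entered
--     :param exits: Sorted references where a trade should be existed
--     :return: Pairs of non-intersecting entry and exit references
--     """
--     last_entry = entry_index = exit_index = 0
--     pairs: typing.List[typing.Tuple[int, int]] = []
--     in_trade: bool = False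
--     while entry_index < len(entries) or exit_index < len(exits):
--         if entry_index >= len(entries) or (
--             exit_index < len(exits) and exits[exit_index] < entries[entry_index]
--         ):
--             if in_trade:
--                 pairs.append((last_entry, exits[exit_index]))
--                 in_trade = False
--             exit_index += 1
--         else:
--             if not in_trade:
--                 last_entry = entries[entry_index]
--                 in_trade = True
--             entry_index += 1
--     return pairs
-- ===== SOURCE B (Python) =====
-- import typing
--
-- def generate_trade_sequence(
--     entries: typing.List[int], exits: typing.List[int]
-- ) -> typing.List[typing.Tuple[int, int]]:
--     # One outer iteration per emitted trade: find the next open entry,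
--     # skip the exits that precede it, skip the entries swallowed by the
--     # trade, emit the pair. No in_trade flag, no merged event stream.
--     pairs: typing.List[typing.Tuple[int, int]] = []
--     i = j = 0
--     n, m = len(entries), len(exits)
--     while i < n:
--         e = entries[i]
--         while j < m and exits[j] < e:   # exits before the open: ignored
--             j += 1
--         if j >= m:                      # no exit left: trade never closes
--             break
--         x = exits[j]
--         i += 1
--         while i < n and entries[i] <= x:  # entries inside the open trade
--             i += 1
--         pairs.append((e, x))
--         j += 1
--     return pairs
-- ===== Notes on version B (the rewrite author's own statement) =====
-- stated objective: simpler
-- what changed: A simulates an event-by-event merge with an in_trade/last_entry state machine advancing one pointer per step; B loops once per emitted trade with two inner skip-scans (exits before the pending entry, entries swallowed by the open trade) and no state flag, emitting exactly one pair per outer iteration.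
import Mathlib
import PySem

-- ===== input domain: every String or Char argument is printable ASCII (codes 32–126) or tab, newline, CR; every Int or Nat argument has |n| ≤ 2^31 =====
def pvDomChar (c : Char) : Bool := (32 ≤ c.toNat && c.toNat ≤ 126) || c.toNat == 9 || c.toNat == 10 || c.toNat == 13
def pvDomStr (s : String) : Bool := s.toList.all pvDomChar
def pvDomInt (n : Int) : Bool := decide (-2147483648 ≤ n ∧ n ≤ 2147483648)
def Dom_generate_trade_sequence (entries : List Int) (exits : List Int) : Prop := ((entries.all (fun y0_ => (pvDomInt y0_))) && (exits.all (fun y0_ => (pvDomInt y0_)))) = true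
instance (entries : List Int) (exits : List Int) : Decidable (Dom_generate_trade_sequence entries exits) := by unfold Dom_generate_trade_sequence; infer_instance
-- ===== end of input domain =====

-- B replaces A's event-by-event merge state machine (in_trade/last_entry, one pointer step
-- per iteration) by one outer loop per emitted trade with two inner skip-scans; objective:
-- simpler (shorter, no state flag), same cost. Recursions carry a fuel argument as a pure
-- totality guard (fuel is always sufficient at the call sites; the proofs show fuel-insensitivity).

-- ===== PORT A =====
-- the while-loop of A, state = (last_entry, entry_index, exit_index, pairs, in_trade)
def gtsLoop (entries : List Int) (exits : List Int) :
    Nat → Int → Nat → Nat → List (Int × Int) → Bool → List (Int × Int)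
  | 0, _, _, _, pairs, _ => pairs
  | fuel+1, last_entry, i, j, pairs, in_trade =>
    if i < entries.length ∨ j < exits.length then
      if entries.length ≤ i ∨ (j < exits.length ∧ exits.getD j 0 < entries.getD i 0) then
        if in_trade then
          gtsLoop entries exits fuel last_entry i (j+1) (pairs ++ [(last_entry, exits.getD j 0)]) false
        else
          gtsLoop entries exits fuel last_entry i (j+1) pairs in_trade
      else
        if in_trade then
          gtsLoop entries exits fuel last_entry (i+1) j pairs in_trade
        else
          gtsLoop entries exits fuel (entries.getD i 0) (i+1) j pairs true
    else pairs

def generate_trade_sequence (entries : List Int) (exits : List Int) : List (Int × Int) :=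
  gtsLoop entries exits (entries.length + exits.length) 0 0 0 [] false

-- ===== PORT B =====
-- B's inner loop 1: advance j past the exits strictly before the pending entry e
def altSkipX (exits : List Int) : Nat → Int → Nat → Nat
  | 0, _, j => j
  | fuel+1, e, j => if j < exits.length ∧ exits.getD j 0 < e then altSkipX exits fuel e (j+1) else j

-- B's inner loop 2: advance i past the entries swallowed by the open trade (≤ x)
def altSkipN (entries : List Int) : Nat → Int → Nat → Nat
  | 0, _, i => i
  | fuel+1, x, i => if i < entries.length ∧ entries.getD i 0 ≤ x then altSkipN entries fuel x (i+1) else i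

-- B's outer loop: one iteration per emitted pair
def altLoop (entries : List Int) (exits : List Int) :
    Nat → Nat → Nat → List (Int × Int) → List (Int × Int)
  | 0, _, _, pairs => pairs
  | fuel+1, i, j, pairs =>
    if i < entries.length then
      if altSkipX exits exits.length (entries.getD i 0) j < exits.length then
        altLoop entries exits fuel
          (altSkipN entries entries.length
            (exits.getD (altSkipX exits exits.length (entries.getD i 0) j) 0) (i+1))
          (altSkipX exits exits.length (entries.getD i 0) j + 1)
          (pairs ++ [(entries.getD i 0, exits.getD (altSkipX exits exits.length (entries.getD i 0) j) 0)])
      else pairs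
    else pairs

def generate_trade_sequence_alt (entries : List Int) (exits : List Int) : List (Int × Int) :=
  altLoop entries exits entries.length 0 0 []

-- ===== PRECONDITION & SPEC =====
def Spec_generate_trade_sequence (entries : List Int) (exits : List Int) (out : List (Int × Int)) : Prop := out = generate_trade_sequence_alt entries exits
instance (entries : List Int) (exits : List Int) (out : List (Int × Int)) : Decidable (Spec_generate_trade_sequence entries exits out) := by unfold Spec_generate_trade_sequence; infer_instance

-- ===== CLAIM (what is proved, stated in full; the proofs are below) =====
def Claim_equal_generate_trade_sequence : Prop := ∀ (entries : List Int) (exits : List Int), Dom_generate_trade_sequence entries exits → Spec_generate_trade_sequence entries exits (generate_trade_sequence entries exits)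

-- ===== LEMMAS AND PROOFS =====

theorem skipX_stop (exits : List Int) (e : Int) (j : Nat)
    (h : ¬ (j < exits.length ∧ exits.getD j 0 < e)) :
    ∀ f, altSkipX exits f e j = j := by
  intro f
  cases f with
  | zero => rfl
  | succ f => simp only [altSkipX]; rw [if_neg h]

theorem skipX_insens (exits : List Int) (e : Int) :
    ∀ f1 f2 j, exits.length - j ≤ f1 → exits.length - j ≤ f2 →
      altSkipX exits f1 e j = altSkipX exits f2 e j := by
  intro f1
  induction f1 with
  | zero =>
    intro f2 j h1 _
    by_cases hc : j < exits.length ∧ exits.getD j 0 < e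
    · exact absurd hc.1 (by omega)
    · rw [skipX_stop exits e j hc, skipX_stop exits e j hc]
  | succ f1 ih =>
    intro f2 j h1 h2
    by_cases hc : j < exits.length ∧ exits.getD j 0 < e
    · have hj := hc.1
      cases f2 with
      | zero => exact absurd hj (by omega)
      | succ f2 =>
        simp only [altSkipX]
        rw [if_pos hc, if_pos hc]
        exact ih f2 (j+1) (by omega) (by omega)
    · rw [skipX_stop exits e j hc, skipX_stop exits e j hc]

theorem skipX_step (exits : List Int) (e : Int) (f j : Nat)
    (hc : j < exits.length ∧ exits.getD j 0 < e) (hf : exits.length - j ≤ f) :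
    altSkipX exits f e j = altSkipX exits f e (j+1) := by
  cases f with
  | zero => exact absurd hc.1 (by omega)
  | succ f =>
    conv_lhs => rw [altSkipX, if_pos hc]
    exact skipX_insens exits e f (f+1) (j+1) (by omega) (by omega)

theorem skipN_stop (entries : List Int) (x : Int) (i : Nat)
    (h : ¬ (i < entries.length ∧ entries.getD i 0 ≤ x)) :
    ∀ f, altSkipN entries f x i = i := by
  intro f
  cases f with
  | zero => rfl
  | succ f => simp only [altSkipN]; rw [if_neg h]

theorem skipN_insens (entries : List Int) (x : Int) :
    ∀ f1 f2 i, entries.length - i ≤ f1 → entries.length - i ≤ f2 →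
      altSkipN entries f1 x i = altSkipN entries f2 x i := by
  intro f1
  induction f1 with
  | zero =>
    intro f2 i h1 _
    by_cases hc : i < entries.length ∧ entries.getD i 0 ≤ x
    · exact absurd hc.1 (by omega)
    · rw [skipN_stop entries x i hc, skipN_stop entries x i hc]
  | succ f1 ih =>
    intro f2 i h1 h2
    by_cases hc : i < entries.length ∧ entries.getD i 0 ≤ x
    · have hi := hc.1
      cases f2 with
      | zero => exact absurd hi (by omega)
      | succ f2 =>
        simp only [altSkipN]
        rw [if_pos hc, if_pos hc]
        exact ih f2 (i+1) (by omega) (by omega)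
    · rw [skipN_stop entries x i hc, skipN_stop entries x i hc]

theorem skipN_step (entries : List Int) (x : Int) (f i : Nat)
    (hc : i < entries.length ∧ entries.getD i 0 ≤ x) (hf : entries.length - i ≤ f) :
    altSkipN entries f x i = altSkipN entries f x (i+1) := by
  cases f with
  | zero => exact absurd hc.1 (by omega)
  | succ f =>
    conv_lhs => rw [altSkipN, if_pos hc]
    exact skipN_insens entries x f (f+1) (i+1) (by omega) (by omega)

theorem skipN_ge (entries : List Int) (x : Int) :
    ∀ f i, i ≤ altSkipN entries f x i := by
  intro f
  induction f with
  | zero => intro i; rfl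
  | succ f ih =>
    intro i
    by_cases hc : i < entries.length ∧ entries.getD i 0 ≤ x
    · simp only [altSkipN]
      rw [if_pos hc]
      exact Nat.le_trans (Nat.le_succ i) (ih (i+1))
    · rw [skipN_stop entries x i hc]

theorem altLoop_stop (entries exits : List Int) (i j : Nat) (pairs : List (Int × Int))
    (h : ¬ i < entries.length) : ∀ f, altLoop entries exits f i j pairs = pairs := by
  intro f
  cases f with
  | zero => rfl
  | succ f => simp only [altLoop]; rw [if_neg h]

theorem altLoop_insens (entries exits : List Int) :
    ∀ f1 f2 i j pairs, entries.length - i ≤ f1 → entries.length - i ≤ f2 →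
      altLoop entries exits f1 i j pairs = altLoop entries exits f2 i j pairs := by
  intro f1
  induction f1 with
  | zero =>
    intro f2 i j pairs h1 _
    by_cases hi : i < entries.length
    · exact absurd hi (by omega)
    · rw [altLoop_stop entries exits i j pairs hi, altLoop_stop entries exits i j pairs hi]
  | succ f1 ih =>
    intro f2 i j pairs h1 h2
    by_cases hi : i < entries.length
    · cases f2 with
      | zero => exact absurd hi (by omega)
      | succ f2 =>
        simp only [altLoop]
        rw [if_pos hi, if_pos hi]
        by_cases hj : altSkipX exits exits.length (entries.getD i 0) j < exits.length
        · rw [if_pos hj, if_pos hj]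
          have hge := skipN_ge entries
            (exits.getD (altSkipX exits exits.length (entries.getD i 0) j) 0)
            entries.length (i+1)
          exact ih f2 _ _ _ (by omega) (by omega)
        · rw [if_neg hj, if_neg hj]
    · rw [altLoop_stop entries exits i j pairs hi, altLoop_stop entries exits i j pairs hi]

theorem altLoop_step (entries exits : List Int) (i j : Nat) (pairs : List (Int × Int))
    (hi : i < entries.length) :
    altLoop entries exits entries.length i j pairs =
      if altSkipX exits exits.length (entries.getD i 0) j < exits.length then
        altLoop entries exits entries.length
          (altSkipN entries entries.length
            (exits.getD (altSkipX exits exits.length (entries.getD i 0) j) 0) (i+1))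
          (altSkipX exits exits.length (entries.getD i 0) j + 1)
          (pairs ++ [(entries.getD i 0, exits.getD (altSkipX exits exits.length (entries.getD i 0) j) 0)])
      else pairs := by
  rw [altLoop_insens entries exits entries.length ((entries.length - i - 1)+1) i j pairs
      (by omega) (by omega)]
  simp only [altLoop]
  rw [if_pos hi]
  by_cases hj : altSkipX exits exits.length (entries.getD i 0) j < exits.length
  · rw [if_pos hj, if_pos hj]
    have hge := skipN_ge entries
      (exits.getD (altSkipX exits exits.length (entries.getD i 0) j) 0)
      entries.length (i+1)
    exact altLoop_insens entries exits _ _ _ _ _ (by omega) (by omega)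
  · rw [if_neg hj, if_neg hj]

theorem altLoop_skip (entries exits : List Int) (i j : Nat) (pairs : List (Int × Int))
    (hj : j < exits.length) (hlt : exits.getD j 0 < entries.getD i 0) :
    altLoop entries exits entries.length i j pairs =
      altLoop entries exits entries.length i (j+1) pairs := by
  by_cases hi : i < entries.length
  · rw [altLoop_step entries exits i j pairs hi, altLoop_step entries exits i (j+1) pairs hi]
    rw [skipX_step exits (entries.getD i 0) exits.length j ⟨hj, hlt⟩ (by omega)]
  · rw [altLoop_stop entries exits i j pairs hi, altLoop_stop entries exits i (j+1) pairs hi]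

-- what gtsLoop's state means in B's terms: not in trade = altLoop from here;
-- in trade on `last` = close at exit j (if any) and continue
def gtsRHS (entries : List Int) (exits : List Int) (last : Int) (i j : Nat)
    (pairs : List (Int × Int)) (tr : Bool) : List (Int × Int) :=
  match tr with
  | true =>
    if j < exits.length then
      altLoop entries exits entries.length
        (altSkipN entries entries.length (exits.getD j 0) i) (j+1)
        (pairs ++ [(last, exits.getD j 0)])
    else pairs
  | false => altLoop entries exits entries.length i j pairs

theorem gtsLoop_eq_RHS (entries exits : List Int) :
    ∀ (F : Nat) (last : Int) (i j : Nat) (pairs : List (Int × Int)) (tr : Bool),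
      (entries.length - i) + (exits.length - j) ≤ F →
      gtsLoop entries exits F last i j pairs tr = gtsRHS entries exits last i j pairs tr := by
  intro F
  induction F with
  | zero =>
    intro last i j pairs tr h
    have hi : ¬ i < entries.length := by omega
    have hj : ¬ j < exits.length := by omega
    cases tr
    · simp only [gtsLoop, gtsRHS]
      exact (altLoop_stop entries exits i j pairs hi entries.length).symm
    · simp only [gtsLoop, gtsRHS]
      rw [if_neg hj]
  | succ F ih =>
    intro last i j pairs tr h
    by_cases hl : i < entries.length ∨ j < exits.length
    · by_cases hc : entries.length ≤ i ∨ (j < exits.length ∧ exits.getD j 0 < entries.getD i 0)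
      · -- exit event
        have hj : j < exits.length := by rcases hc with h' | ⟨hj, _⟩ <;> omega
        cases tr
        · -- not in trade: the exit is ignored
          simp only [gtsLoop]
          rw [if_pos hl, if_pos hc, if_neg (by decide : ¬ (false = true)),
              ih last i (j+1) pairs false (by omega)]
          simp only [gtsRHS]
          rcases hc with h' | ⟨hj', hlt⟩
          · rw [altLoop_stop entries exits i (j+1) pairs (by omega),
                altLoop_stop entries exits i j pairs (by omega)]
          · exact (altLoop_skip entries exits i j pairs hj' hlt).symm
        · -- in trade: emit the pair and continue not-in-trade
          simp only [gtsLoop]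
          rw [if_pos hl, if_pos hc, if_pos trivial,
              ih last i (j+1) (pairs ++ [(last, exits.getD j 0)]) false (by omega)]
          have hstop : altSkipN entries entries.length (exits.getD j 0) i = i :=
            skipN_stop entries (exits.getD j 0) i
              (by intro hh; obtain ⟨hh1, hh2⟩ := hh; rcases hc with h' | ⟨_, hlt⟩ <;> omega)
              entries.length
          simp only [gtsRHS]
          rw [if_pos hj, hstop]
      · -- entry event
        have hc' := hc
        rw [not_or] at hc'
        obtain ⟨hi', hc2⟩ := hc'
        have hi : i < entries.length := by omega
        cases tr
        · -- not in trade: open the trade at entries[i]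
          simp only [gtsLoop]
          rw [if_pos hl, if_neg hc, if_neg (by decide : ¬ (false = true)),
              ih (entries.getD i 0) (i+1) j pairs true (by omega)]
          have hstop : altSkipX exits exits.length (entries.getD i 0) j = j :=
            skipX_stop exits (entries.getD i 0) j hc2 exits.length
          simp only [gtsRHS]
          rw [altLoop_step entries exits i j pairs hi, hstop]
        · -- in trade: the entry is swallowed by the open trade
          simp only [gtsLoop]
          rw [if_pos hl, if_neg hc, if_pos trivial,
              ih last (i+1) j pairs true (by omega)]
          simp only [gtsRHS]
          by_cases hj : j < exits.length
          · have hle : entries.getD i 0 ≤ exits.getD j 0 := by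
              by_contra hx
              exact hc2 ⟨hj, by omega⟩
            rw [if_pos hj, if_pos hj,
                skipN_step entries (exits.getD j 0) entries.length i ⟨hi, hle⟩ (by omega)]
          · rw [if_neg hj, if_neg hj]
    · -- terminal: both pointers exhausted
      rw [not_or] at hl
      obtain ⟨hi, hj⟩ := hl
      simp only [gtsLoop]
      rw [if_neg (by rw [not_or]; exact ⟨hi, hj⟩)]
      cases tr
      · simp only [gtsRHS]
        exact (altLoop_stop entries exits i j pairs hi entries.length).symm
      · simp only [gtsRHS]
        rw [if_neg hj]

-- ===== VERDICT (by name: the statement is the Claim_ definition above) =====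
theorem generate_trade_sequence_spec : Claim_equal_generate_trade_sequence := by
  intro entries exits _
  unfold Spec_generate_trade_sequence generate_trade_sequence generate_trade_sequence_alt
  rw [gtsLoop_eq_RHS entries exits (entries.length + exits.length) 0 0 0 [] false (by omega)]
  simp only [gtsRHS]
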